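-- pv_equiv track=rewrite | github.com/bowenzou3/Arrangr | Arrangr.py | get_diatonic_chord_tables
-- ===== SOURCE A (Python) =====
-- def get_diatonic_chord_tables(root_pc, mode='major'):
--     """Return a list of triad PC sets for a key (I-ii-iii-IV-V-vi-viiº)."""
--     if mode == 'minor':
--         # Natural minor triads
--         intervals = [0, 2, 3, 5, 7, 8, 10]
--         chord_templates = [
--             [0, 3, 7], [2, 5, 9], [3, 7, 10], [5, 8, 0],
--             [7, 10, 2], [8, 0, 3], [10, 2, 5]
--         ]
--     else:
--         intervals = [0, 2, 4, 5, 7, 9, 11]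
--         chord_templates = [
--             [0, 4, 7], [2, 5, 9], [4, 7, 11], [5, 9, 0],
--             [7, 11, 2], [9, 0, 4], [11, 2, 5]
--         ]
--
--     chords = []
--     for template in chord_templates:
--         chords.append({(root_pc + interval) % 12 for interval in template})
--
--     return chords
-- ===== SOURCE B (Python) =====
-- def get_diatonic_chord_tables(root_pc, mode='major'):
--     """Return a list of triad PC sets for a key (I-ii-iii-IV-V-vi-viiº)."""
--     intervals = [0, 2, 3, 5, 7, 8, 10] if mode == 'minor' else [0, 2, 4, 5, 7, 9, 11]
--     return [{(root_pc + intervals[(i + 2 * k) % 7]) % 12 for k in range(3)}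
--             for i in range(7)]
-- ===== Notes on version B (the rewrite author's own statement) =====
-- stated objective: simpler
-- what changed: Drops the hardcoded per-mode chord_templates table and derives each diatonic triad by stacking thirds over the scale: degree i yields {(root_pc + intervals[(i+2k)%7]) % 12 for k in range(3)}.
-- intended difference: For mode='minor' A's hardcoded table gives the degree-ii triad as {(root_pc+2)%12,(root_pc+5)%12,(root_pc+9)%12} (a minor triad), while B stacks thirds over the natural minor scale and returns {(root_pc+2)%12,(root_pc+5)%12,(root_pc+8)%12}, the diminished ii° triad that the natural-minor key actually contains and A's own 'Natural minor triads' comment promises. — e.g. on get_diatonic_chord_tables(0, "minor"): A returns [[0, 3, 7], [2, 5, 9], [3, 7, 10], [5, 8, 0], [7, 10, 2], [8, 0, 3], [10, 2, 5]], B returns [[0, 3, 7], [2, 5, 8], [3, 7, 10], [5, 8, 0], [7, 10, 2], [8, 0, 3], [10, 2, 5]]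
import Mathlib
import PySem

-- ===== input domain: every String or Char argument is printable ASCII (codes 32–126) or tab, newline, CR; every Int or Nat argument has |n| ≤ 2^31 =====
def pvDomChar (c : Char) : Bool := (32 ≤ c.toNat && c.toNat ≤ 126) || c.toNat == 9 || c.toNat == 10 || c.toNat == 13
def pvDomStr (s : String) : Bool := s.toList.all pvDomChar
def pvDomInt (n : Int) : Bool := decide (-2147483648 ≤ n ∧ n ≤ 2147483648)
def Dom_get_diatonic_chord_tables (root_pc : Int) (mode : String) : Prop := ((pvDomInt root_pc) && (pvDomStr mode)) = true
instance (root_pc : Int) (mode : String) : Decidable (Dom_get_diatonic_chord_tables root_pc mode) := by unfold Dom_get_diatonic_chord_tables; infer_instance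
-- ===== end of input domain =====

-- B derives the triads by stacking thirds over the scale instead of A's hardcoded chord table;
-- in minor mode A's table mis-states the degree-ii triad (see D_ below). Return-value equivalence only.

-- ===== PORT A =====
-- A: pick intervals and a hardcoded chord_templates table per mode, then for each
-- template append the set {(root_pc + interval) % 12 for interval in template}.
def get_diatonic_chord_tables (root_pc : Int) (mode : String) : List (List Int) :=
  let chord_templates : List (List Int) :=
    if mode = "minor" then
      [[0, 3, 7], [2, 5, 9], [3, 7, 10], [5, 8, 0],
       [7, 10, 2], [8, 0, 3], [10, 2, 5]]
    else
      [[0, 4, 7], [2, 5, 9], [4, 7, 11], [5, 9, 0],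
       [7, 11, 2], [9, 0, 4], [11, 2, 5]]
  chord_templates.foldl
    (fun chords template =>
      chords ++ [PySem.Set.ofList (template.map (fun interval => PySem.Int.mod (root_pc + interval) 12))])
    []

-- ===== PORT B =====
-- B: keep only the scale intervals; triad of degree i = thirds stacked at indices (i+2k)%7.
def get_diatonic_chord_tables_alt (root_pc : Int) (mode : String) : List (List Int) :=
  let intervals : List Int :=
    if mode = "minor" then [0, 2, 3, 5, 7, 8, 10] else [0, 2, 4, 5, 7, 9, 11]
  (PySem.List.pyRange 0 7 1).map (fun i =>
    PySem.Set.ofList ((PySem.List.pyRange 0 3 1).map (fun k =>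
      PySem.Int.mod (root_pc + PySem.List.pyGetD intervals (PySem.Int.mod (i + 2 * k) 7) 0) 12)))

-- ===== PRECONDITION & SPEC =====
-- In minor mode A returns [2,5,9] (a minor triad) as the degree-ii chord of the natural minor
-- key, where B returns the stacked-thirds value [2,5,8] (the diminished ii°), which is the
-- correct natural-minor triad A's own comment promises; all other triads agree.
def D_get_diatonic_chord_tables (root_pc : Int) (mode : String) : Prop := mode = "minor"
instance (root_pc : Int) (mode : String) : Decidable (D_get_diatonic_chord_tables root_pc mode) := by unfold D_get_diatonic_chord_tables; infer_instance

def Spec_get_diatonic_chord_tables (root_pc : Int) (mode : String) (out : List (List Int)) : Prop := ¬ D_get_diatonic_chord_tables root_pc mode → out = get_diatonic_chord_tables_alt root_pc mode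
instance (root_pc : Int) (mode : String) (out : List (List Int)) : Decidable (Spec_get_diatonic_chord_tables root_pc mode out) := by unfold Spec_get_diatonic_chord_tables; infer_instance

def pvDiffWitness_get_diatonic_chord_tables : Int × String := (0, "minor")
def pvDiffWitnessOut_get_diatonic_chord_tables : (List (List Int)) × (List (List Int)) :=
  ([[0, 3, 7], [2, 5, 9], [3, 7, 10], [5, 8, 0], [7, 10, 2], [8, 0, 3], [10, 2, 5]],
   [[0, 3, 7], [2, 5, 8], [3, 7, 10], [5, 8, 0], [7, 10, 2], [8, 0, 3], [10, 2, 5]])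

-- ===== CLAIM (what is proved, stated in full; the proofs are below) =====
def Claim_unchanged_get_diatonic_chord_tables : Prop := ∀ (root_pc : Int) (mode : String), Dom_get_diatonic_chord_tables root_pc mode → Spec_get_diatonic_chord_tables root_pc mode (get_diatonic_chord_tables root_pc mode)
def Claim_changed_get_diatonic_chord_tables : Prop := Dom_get_diatonic_chord_tables (pvDiffWitness_get_diatonic_chord_tables.1) (pvDiffWitness_get_diatonic_chord_tables.2) ∧ D_get_diatonic_chord_tables (pvDiffWitness_get_diatonic_chord_tables.1) (pvDiffWitness_get_diatonic_chord_tables.2) ∧ get_diatonic_chord_tables (pvDiffWitness_get_diatonic_chord_tables.1) (pvDiffWitness_get_diatonic_chord_tables.2) = pvDiffWitnessOut_get_diatonic_chord_tables.1 ∧ get_diatonic_chord_tables_alt (pvDiffWitness_get_diatonic_chord_tables.1) (pvDiffWitness_get_diatonic_chord_tables.2) = pvDiffWitnessOut_get_diatonic_chord_tables.2 ∧ pvDiffWitnessOut_get_diatonic_chord_tables.1 ≠ pvDiffWitnessOut_get_diatonic_chord_tables.2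
def Claim_exact_get_diatonic_chord_tables : Prop := ∀ (root_pc : Int) (mode : String), Dom_get_diatonic_chord_tables root_pc mode → D_get_diatonic_chord_tables root_pc mode → get_diatonic_chord_tables root_pc mode ≠ get_diatonic_chord_tables_alt root_pc mode

-- ===== LEMMAS AND PROOFS =====

-- ===== VERDICT (by name: the statement is the Claim_ definition above) =====
theorem get_diatonic_chord_tables_spec : Claim_unchanged_get_diatonic_chord_tables := by
  intro root_pc mode _ hnd
  simp only [D_get_diatonic_chord_tables] at hnd
  simp [get_diatonic_chord_tables, get_diatonic_chord_tables_alt, hnd,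
    PySem.List.pyRange, PySem.List.pyGetD, PySem.List.pyGet?, PySem.List.pyIdx?,
    PySem.Int.mod, PySem.Set.ofList, PySem.Set.add, PySem.Set.contains, List.foldl,
    List.range_succ]

theorem get_diatonic_chord_tables_changed : Claim_changed_get_diatonic_chord_tables := by
  unfold Claim_changed_get_diatonic_chord_tables; decide

theorem get_diatonic_chord_tables_tight : Claim_exact_get_diatonic_chord_tables := by
  intro root_pc mode _ hd heq
  simp only [D_get_diatonic_chord_tables] at hd
  -- compare the degree-ii triads (index 1), whose top notes (r+9)%12 vs (r+8)%12 always differ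
  have h2 := congrArg (fun l => l.getD 1 []) heq
  have n52 : ¬((root_pc + 5) % 12 = (root_pc + 2) % 12) := by omega
  have n92 : ¬((root_pc + 9) % 12 = (root_pc + 2) % 12) := by omega
  have n95 : ¬((root_pc + 9) % 12 = (root_pc + 5) % 12) := by omega
  have n82 : ¬((root_pc + 8) % 12 = (root_pc + 2) % 12) := by omega
  have n85 : ¬((root_pc + 8) % 12 = (root_pc + 5) % 12) := by omega
  have n98 : ¬((root_pc + 9) % 12 = (root_pc + 8) % 12) := by omega
  simp [get_diatonic_chord_tables, get_diatonic_chord_tables_alt, hd,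
    PySem.List.pyRange, PySem.List.pyGetD, PySem.List.pyGet?, PySem.List.pyIdx?,
    PySem.Set.ofList, PySem.Set.add, PySem.Set.contains, List.foldl,
    List.range_succ, n52, n92, n95, n82, n85, n98] at h2
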